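-- pv_equiv track=rewrite | github.com/DileepKothapalli/8-Basket | allocation/newallot.py | stats_of_team
-- ===== SOURCE A (Python) =====
-- def stats_of_team(curr_list):
--     f = 0
--     s = 0
--     cost = 0
--     value = 0
--     for i in curr_list:
--         cost += i[2]
--         value += i[3]
--         if i[4] == 1:
--             f += 1
--         else:
--             s += 1
--     return f, s, cost, value
-- ===== SOURCE B (Python) =====
-- def stats_of_team(curr_list):
--     if not curr_list:
--         return (0, 0, 0, 0)
--     if len(curr_list) == 1:
--         i = curr_list[0]
--         return (1, 0, i[2], i[3]) if i[4] == 1 else (0, 1, i[2], i[3])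
--     mid = len(curr_list) // 2
--     f1, s1, c1, v1 = stats_of_team(curr_list[:mid])
--     f2, s2, c2, v2 = stats_of_team(curr_list[mid:])
--     return (f1 + f2, s1 + s2, c1 + c2, v1 + v2)
-- ===== Notes on version B (the rewrite author's own statement) =====
-- stated objective: alternative
-- what changed: Replaces A's single fused left-to-right accumulation loop with a divide-and-conquer recursion: split the list in half, recurse on both halves, and combine the four aggregates componentwise; correct because all four statistics are sums over the elements.
import Mathlib
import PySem

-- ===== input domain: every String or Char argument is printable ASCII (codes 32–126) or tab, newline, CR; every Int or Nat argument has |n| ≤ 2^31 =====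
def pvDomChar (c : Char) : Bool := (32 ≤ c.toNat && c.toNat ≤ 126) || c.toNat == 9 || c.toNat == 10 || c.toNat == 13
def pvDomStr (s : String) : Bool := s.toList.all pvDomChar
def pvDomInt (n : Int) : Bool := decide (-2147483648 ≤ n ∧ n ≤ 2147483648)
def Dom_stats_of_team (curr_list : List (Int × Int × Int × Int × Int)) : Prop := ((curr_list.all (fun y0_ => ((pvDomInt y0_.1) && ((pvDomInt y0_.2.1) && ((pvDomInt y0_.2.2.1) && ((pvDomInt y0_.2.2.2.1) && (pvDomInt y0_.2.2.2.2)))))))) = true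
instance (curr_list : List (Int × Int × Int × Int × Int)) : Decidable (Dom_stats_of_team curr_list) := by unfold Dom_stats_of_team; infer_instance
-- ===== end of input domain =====

-- B replaces A's single fused accumulation loop with a divide-and-conquer recursion (split in half, recurse, combine componentwise); objective: alternative.


-- ===== PORT A =====
def stats_of_team (curr_list : List (Int × Int × Int × Int × Int)) : Int × Int × Int × Int :=
  curr_list.foldl (fun (acc : Int × Int × Int × Int) i =>
    let cost := acc.2.2.1 + i.2.2.1
    let value := acc.2.2.2 + i.2.2.2.1
    if i.2.2.2.2 == 1 then (acc.1 + 1, acc.2.1, cost, value)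
    else (acc.1, acc.2.1 + 1, cost, value)) (0, 0, 0, 0)

-- ===== PORT B =====
def stats_of_team_alt (curr_list : List (Int × Int × Int × Int × Int)) : Int × Int × Int × Int :=
  match curr_list with
  | [] => (0, 0, 0, 0)
  | [i] => if i.2.2.2.2 == 1 then (1, 0, i.2.2.1, i.2.2.2.1) else (0, 1, i.2.2.1, i.2.2.2.1)
  | a :: b :: t =>
    let l := a :: b :: t
    let mid := l.length / 2
    let x := stats_of_team_alt (l.take mid)
    let y := stats_of_team_alt (l.drop mid)
    (x.1 + y.1, x.2.1 + y.2.1, x.2.2.1 + y.2.2.1, x.2.2.2 + y.2.2.2)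
termination_by curr_list.length
decreasing_by
  · simp only [List.length_take, List.length_cons]; omega
  · simp only [List.length_drop, List.length_cons]; omega

-- ===== PRECONDITION & SPEC =====
def Spec_stats_of_team (curr_list : List (Int × Int × Int × Int × Int)) (out : Int × Int × Int × Int) : Prop := out = stats_of_team_alt curr_list
instance (curr_list : List (Int × Int × Int × Int × Int)) (out : Int × Int × Int × Int) : Decidable (Spec_stats_of_team curr_list out) := by unfold Spec_stats_of_team; infer_instance

-- ===== CLAIM (what is proved, stated in full; the proofs are below) =====
def Claim_equal_stats_of_team : Prop := ∀ (curr_list : List (Int × Int × Int × Int × Int)), Dom_stats_of_team curr_list → Spec_stats_of_team curr_list (stats_of_team curr_list)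

-- ===== LEMMAS AND PROOFS =====

-- the closed-form quadruple both programs compute
def statsT (l : List (Int × Int × Int × Int × Int)) : Int × Int × Int × Int :=
  (((l.filter (fun i => i.2.2.2.2 == 1)).length : Int),
   ((l.filter (fun i => ¬ i.2.2.2.2 == 1)).length : Int),
   (l.map (fun i => i.2.2.1)).sum,
   (l.map (fun i => i.2.2.2.1)).sum)

lemma statsT_append (a b : List (Int × Int × Int × Int × Int)) :
    statsT (a ++ b) = ((statsT a).1 + (statsT b).1, (statsT a).2.1 + (statsT b).2.1,
      (statsT a).2.2.1 + (statsT b).2.2.1, (statsT a).2.2.2 + (statsT b).2.2.2) := by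
  simp [statsT]

lemma alt_eq_statsT (l : List (Int × Int × Int × Int × Int)) :
    stats_of_team_alt l = statsT l := by
  induction l using stats_of_team_alt.induct with
  | case1 => simp [stats_of_team_alt, statsT]
  | case2 i h =>
    have hc : i.2.2.2.2 = 1 := by simpa using h
    rw [stats_of_team_alt]; simp [statsT, hc]
  | case3 i h =>
    have hc : ¬ i.2.2.2.2 = 1 := by simpa using h
    rw [stats_of_team_alt]; simp [statsT, hc]
  | case4 a b t l mid ihx ihy =>
    rw [stats_of_team_alt]
    rw [ihx, ihy]
    conv_rhs => rw [show statsT (a :: b :: t) = statsT ((a :: b :: t).take ((a :: b :: t).length / 2) ++ (a :: b :: t).drop ((a :: b :: t).length / 2)) by rw [List.take_append_drop]]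
    rw [statsT_append]

lemma fold_eq_statsT (l : List (Int × Int × Int × Int × Int)) (f s c v : Int) :
    l.foldl (fun (acc : Int × Int × Int × Int) i =>
      let cost := acc.2.2.1 + i.2.2.1
      let value := acc.2.2.2 + i.2.2.2.1
      if i.2.2.2.2 == 1 then (acc.1 + 1, acc.2.1, cost, value)
      else (acc.1, acc.2.1 + 1, cost, value)) (f, s, c, v)
    = (f + (statsT l).1, s + (statsT l).2.1, c + (statsT l).2.2.1, v + (statsT l).2.2.2) := by
  induction l generalizing f s c v with
  | nil => simp [statsT]
  | cons h t ih =>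
    simp only [List.foldl_cons]
    by_cases hc : h.2.2.2.2 = 1
    · rw [if_pos (by simp [hc]), ih]
      simp [statsT, hc, Prod.ext_iff]
      omega
    · rw [if_neg (by simp [hc]), ih]
      simp [statsT, hc, Prod.ext_iff]
      omega

-- ===== VERDICT (by name: the statement is the Claim_ definition above) =====
theorem stats_of_team_spec : Claim_equal_stats_of_team := by
  intro l _
  show stats_of_team l = stats_of_team_alt l
  rw [alt_eq_statsT, stats_of_team, fold_eq_statsT]
  simp
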